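-- pv_equiv track=rewrite | github.com/A1eeeeex/carla_testbed | tbio/ros2/observability.py | infer_topic_types
-- ===== SOURCE A (Python) =====
-- from typing import Dict, Iterable, List, Optional
--
-- def infer_topic_types(topics: Iterable[str]) -> Dict[str, str]:
--     typed: Dict[str, str] = {}
--     for topic in topics:
--         if not topic:
--             continue
--         if topic.endswith("/image"):
--             typed[topic] = "sensor_msgs/msg/Image"
--         elif topic.endswith("/camera_info"):
--             typed[topic] = "sensor_msgs/msg/CameraInfo"
--         elif topic.endswith("/imu"):
--             typed[topic] = "sensor_msgs/msg/Imu"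
--         elif topic.endswith("/gnss"):
--             typed[topic] = "sensor_msgs/msg/NavSatFix"
--         elif topic.endswith("/points") or topic.endswith("/point_cloud"):
--             typed[topic] = "sensor_msgs/msg/PointCloud2"
--         elif topic.endswith("/odom"):
--             typed[topic] = "nav_msgs/msg/Odometry"
--         elif topic.endswith("/objects3d"):
--             typed[topic] = "vision_msgs/msg/Detection3DArray"
--         elif topic.endswith("/objects_markers"):
--             typed[topic] = "visualization_msgs/msg/MarkerArray"
--         elif topic.endswith("/objects_gt_json"):
--             typed[topic] = "std_msgs/msg/String"
--         elif topic == "/clock":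
--             typed[topic] = "rosgraph_msgs/msg/Clock"
--         elif topic == "/tf":
--             typed[topic] = "tf2_msgs/msg/TFMessage"
--     return typed
-- ===== SOURCE B (Python) =====
-- _LEAF_TYPES = {
--     "image": "sensor_msgs/msg/Image",
--     "camera_info": "sensor_msgs/msg/CameraInfo",
--     "imu": "sensor_msgs/msg/Imu",
--     "gnss": "sensor_msgs/msg/NavSatFix",
--     "points": "sensor_msgs/msg/PointCloud2",
--     "point_cloud": "sensor_msgs/msg/PointCloud2",
--     "odom": "nav_msgs/msg/Odometry",
--     "objects3d": "vision_msgs/msg/Detection3DArray",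
--     "objects_markers": "visualization_msgs/msg/MarkerArray",
--     "objects_gt_json": "std_msgs/msg/String",
-- }
-- _EXACT_TYPES = {
--     "/clock": "rosgraph_msgs/msg/Clock",
--     "/tf": "tf2_msgs/msg/TFMessage",
-- }
--
-- def _topic_type(topic):
--     # every suffix rule of the original is '/<leaf>' with no further '/',
--     # so it holds iff the last path segment of the topic equals <leaf>
--     _, sep, leaf = topic.rpartition("/")
--     mt = _LEAF_TYPES.get(leaf) if sep else None
--     return mt if mt is not None else _EXACT_TYPES.get(topic)
--
-- def infer_topic_types(topics):
--     pairs = ((t, _topic_type(t)) for t in topics if t)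
--     return {t: mt for t, mt in pairs if mt is not None}
-- ===== Notes on version B (the rewrite author's own statement) =====
-- stated objective: faster
-- what changed: Instead of trying A's eleven ordered suffix/equality branches per topic, B splits each topic at its last '/' (rpartition) and resolves the last path segment with a single dict lookup, falling back to an exact-name dict; correct because every suffix rule of A is '/<leaf>' with distinct leaves, so at most one rule can match and first-match order is irrelevant.
import Mathlib
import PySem

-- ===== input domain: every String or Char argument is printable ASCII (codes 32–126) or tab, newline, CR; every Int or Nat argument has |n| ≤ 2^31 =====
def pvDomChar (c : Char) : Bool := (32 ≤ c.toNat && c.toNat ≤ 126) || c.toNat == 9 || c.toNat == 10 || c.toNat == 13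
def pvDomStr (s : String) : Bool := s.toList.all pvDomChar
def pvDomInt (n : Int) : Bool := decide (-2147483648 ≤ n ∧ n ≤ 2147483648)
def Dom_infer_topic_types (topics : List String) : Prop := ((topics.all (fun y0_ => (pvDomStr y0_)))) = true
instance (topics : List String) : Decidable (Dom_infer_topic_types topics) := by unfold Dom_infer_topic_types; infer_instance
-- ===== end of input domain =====

-- B classifies each topic by one hash lookup on its last path segment (rpartition) plus an
-- exact-name lookup, instead of A's ordered eleven-branch suffix chain; objective: faster
-- (measured).


-- ===== PORT A =====
-- loop body of A's for-loop (the if-elif chain)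
def itStepA (typed : PySem.Dict String String) (topic : String) : PySem.Dict String String :=
  if topic = "" then typed
  else if PySem.Str.endswith topic "/image" then typed.insert topic "sensor_msgs/msg/Image"
  else if PySem.Str.endswith topic "/camera_info" then typed.insert topic "sensor_msgs/msg/CameraInfo"
  else if PySem.Str.endswith topic "/imu" then typed.insert topic "sensor_msgs/msg/Imu"
  else if PySem.Str.endswith topic "/gnss" then typed.insert topic "sensor_msgs/msg/NavSatFix"
  else if PySem.Str.endswith topic "/points" || PySem.Str.endswith topic "/point_cloud" then typed.insert topic "sensor_msgs/msg/PointCloud2"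
  else if PySem.Str.endswith topic "/odom" then typed.insert topic "nav_msgs/msg/Odometry"
  else if PySem.Str.endswith topic "/objects3d" then typed.insert topic "vision_msgs/msg/Detection3DArray"
  else if PySem.Str.endswith topic "/objects_markers" then typed.insert topic "visualization_msgs/msg/MarkerArray"
  else if PySem.Str.endswith topic "/objects_gt_json" then typed.insert topic "std_msgs/msg/String"
  else if topic = "/clock" then typed.insert topic "rosgraph_msgs/msg/Clock"
  else if topic = "/tf" then typed.insert topic "tf2_msgs/msg/TFMessage"
  else typed

def infer_topic_types (topics : List String) : List (String × String) :=
  (topics.foldl itStepA PySem.Dict.empty).items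

-- ===== PORT B =====
def itLeafTable : PySem.Dict String String := PySem.Dict.ofList
  [("image", "sensor_msgs/msg/Image"),
   ("camera_info", "sensor_msgs/msg/CameraInfo"),
   ("imu", "sensor_msgs/msg/Imu"),
   ("gnss", "sensor_msgs/msg/NavSatFix"),
   ("points", "sensor_msgs/msg/PointCloud2"),
   ("point_cloud", "sensor_msgs/msg/PointCloud2"),
   ("odom", "nav_msgs/msg/Odometry"),
   ("objects3d", "vision_msgs/msg/Detection3DArray"),
   ("objects_markers", "visualization_msgs/msg/MarkerArray"),
   ("objects_gt_json", "std_msgs/msg/String")]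

def itExactTable : PySem.Dict String String := PySem.Dict.ofList
  [("/clock", "rosgraph_msgs/msg/Clock"), ("/tf", "tf2_msgs/msg/TFMessage")]

-- hand port of topic.rpartition("/") (PySem has no rpartition); exact for this
-- single-character separator: split at the LAST '/', and ("", "", topic) when absent
def itRpartitionSlash (l : List Char) : List Char × List Char × List Char :=
  if (l.reverse.takeWhile (fun c => c ≠ '/')).length = l.length then ([], [], l)
  else (l.take (l.length - (l.reverse.takeWhile (fun c => c ≠ '/')).length - 1), ['/'],
    (l.reverse.takeWhile (fun c => c ≠ '/')).reverse)

-- port of _topic_type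
def itTopicType (topic : String) : Option String :=
  match (if (itRpartitionSlash topic.toList).2.1 ≠ [] then
      itLeafTable.get? (String.ofList (itRpartitionSlash topic.toList).2.2) else none) with
  | some v => some v
  | none => itExactTable.get? topic

def infer_topic_types_alt (topics : List String) : List (String × String) :=
  let pairs := (topics.filter (fun t => t ≠ "")).map (fun t => (t, itTopicType t))
  (pairs.foldl (fun d p => match p.2 with | some mt => d.insert p.1 mt | none => d) PySem.Dict.empty).items

-- ===== PRECONDITION & SPEC =====
def Spec_infer_topic_types (topics : List String) (out : List (String × String)) : Prop := out = infer_topic_types_alt topics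
instance (topics : List String) (out : List (String × String)) : Decidable (Spec_infer_topic_types topics out) := by unfold Spec_infer_topic_types; infer_instance

-- ===== CLAIM (what is proved, stated in full; the proofs are below) =====
def Claim_equal_infer_topic_types : Prop := ∀ (topics : List String), Dom_infer_topic_types topics → Spec_infer_topic_types topics (infer_topic_types topics)

-- ===== LEMMAS AND PROOFS =====

-- takeWhile stops exactly at the first '/'
theorem takeWhile_append_slash (q rest : List Char) (hq : ∀ a ∈ q, a ≠ '/') :
    (q ++ '/' :: rest).takeWhile (fun c => decide (c ≠ '/')) = q := by
  induction q with
  | nil => simp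
  | cons a q ih =>
    have ha : a ≠ '/' := hq a (by simp)
    rw [List.cons_append, List.takeWhile_cons_of_pos (by simpa using ha),
      ih (fun b hb => hq b (by simp [hb]))]

theorem prefix_append_slash_iff (q r : List Char) (hq : '/' ∉ q) :
    (q ++ ['/']) <+: r ↔ '/' ∈ r ∧ r.takeWhile (fun c => decide (c ≠ '/')) = q := by
  constructor
  · rintro ⟨u, hu⟩
    have hr : r = q ++ '/' :: u := by rw [← hu]; simp
    subst hr
    refine ⟨by simp, takeWhile_append_slash q u (fun a ha h => hq (h ▸ ha))⟩
  · rintro ⟨hm, ht⟩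
    have hsplit := List.takeWhile_append_dropWhile (p := fun c => decide (c ≠ '/')) (l := r)
    have hne : r.dropWhile (fun c => decide (c ≠ '/')) ≠ [] := by
      intro h
      rw [h, List.append_nil, ht] at hsplit
      exact hq (hsplit ▸ hm)
    have hhead := List.head_dropWhile_not (p := fun c => decide (c ≠ '/')) hne
    obtain ⟨c, rest, hc⟩ := List.exists_cons_of_ne_nil hne
    have hcslash : c = '/' := by
      simp only [hc, List.head_cons] at hhead
      simpa using hhead
    exact ⟨rest, by rw [← hsplit, ht, hc, hcslash]; simp⟩

-- the key equivalence: 'topic.endswith("/" + p)' ⟺ '/' occurs and the last segment is p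
theorem endswith_slash_iff (l p : List Char) (hp : '/' ∉ p) :
    PySem.Chars.endswith l ('/' :: p) = true ↔
      '/' ∈ l ∧ l.reverse.takeWhile (fun c => decide (c ≠ '/')) = p.reverse := by
  rw [PySem.Chars.endswith_iff, ← List.reverse_prefix]
  have : ('/' :: p).reverse = p.reverse ++ ['/'] := by simp
  rw [this, prefix_append_slash_iff _ _ (by simpa using hp)]
  simp

-- the reversed last segment is the whole (reversed) string iff there is no '/'
theorem leafR_full_iff (l : List Char) :
    (l.reverse.takeWhile (fun c => decide (c ≠ '/'))).length = l.length ↔ '/' ∉ l := by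
  constructor
  · intro h
    have hp : l.reverse.takeWhile (fun c => decide (c ≠ '/')) <+: l.reverse :=
      List.takeWhile_prefix _
    have := hp.eq_of_length (by simpa using h)
    intro hm
    have hm' : '/' ∈ l.reverse := by simpa using hm
    have := List.mem_takeWhile_imp (this ▸ hm')
    simp at this
  · intro h
    rw [List.takeWhile_eq_self_iff.mpr (by intro a ha; simp at ha ⊢; intro hc; exact h (hc ▸ ha))]
    simp

-- endswith as a Bool test on the last path segment, when a '/' is present
theorem endswith_leaf (l p : List Char) (hp : '/' ∉ p) (hs : '/' ∈ l) :
    PySem.Chars.endswith l ('/' :: p) =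
      (String.ofList (l.reverse.takeWhile (fun c => decide (c ≠ '/'))).reverse == String.ofList p) := by
  rw [Bool.eq_iff_iff, endswith_slash_iff l p hp]
  simp only [hs, true_and, beq_iff_eq]
  constructor
  · intro h; rw [h, List.reverse_reverse]
  · intro h
    have := String.toList_inj.mpr h
    simp only [String.toList_ofList] at this
    rw [← this, List.reverse_reverse]

-- endswith is false when the topic has no '/'
theorem endswith_no_slash (l p : List Char) (hp : '/' ∉ p) (hs : '/' ∉ l) :
    PySem.Chars.endswith l ('/' :: p) = false := by
  rw [Bool.eq_false_iff]
  intro hb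
  exact hs ((endswith_slash_iff l p hp).mp hb).1

-- the two literal dict lookups, spelled out
theorem tbl_eq_aux : itLeafTable = PySem.Dict.mk
    [("image", "sensor_msgs/msg/Image"),
     ("camera_info", "sensor_msgs/msg/CameraInfo"),
     ("imu", "sensor_msgs/msg/Imu"),
     ("gnss", "sensor_msgs/msg/NavSatFix"),
     ("points", "sensor_msgs/msg/PointCloud2"),
     ("point_cloud", "sensor_msgs/msg/PointCloud2"),
     ("odom", "nav_msgs/msg/Odometry"),
     ("objects3d", "vision_msgs/msg/Detection3DArray"),
     ("objects_markers", "visualization_msgs/msg/MarkerArray"),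
     ("objects_gt_json", "std_msgs/msg/String")] := rfl

set_option maxHeartbeats 1600000 in
theorem leafTable_get? (s : String) : itLeafTable.get? s =
    if s = "image" then some "sensor_msgs/msg/Image"
    else if s = "camera_info" then some "sensor_msgs/msg/CameraInfo"
    else if s = "imu" then some "sensor_msgs/msg/Imu"
    else if s = "gnss" then some "sensor_msgs/msg/NavSatFix"
    else if s = "points" then some "sensor_msgs/msg/PointCloud2"
    else if s = "point_cloud" then some "sensor_msgs/msg/PointCloud2"
    else if s = "odom" then some "nav_msgs/msg/Odometry"
    else if s = "objects3d" then some "vision_msgs/msg/Detection3DArray"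
    else if s = "objects_markers" then some "visualization_msgs/msg/MarkerArray"
    else if s = "objects_gt_json" then some "std_msgs/msg/String"
    else none := by
  rw [tbl_eq_aux]
  simp only [PySem.Dict.get?_mk_cons]
  rcases eq_or_ne s "image" with h0|h0
  · subst h0; decide
  rw [if_neg (show ¬(("image" : String) == s) = true from by
      simp only [beq_iff_eq]; exact fun hh => h0 hh.symm), if_neg h0]
  rcases eq_or_ne s "camera_info" with h1|h1
  · subst h1; decide
  rw [if_neg (show ¬(("camera_info" : String) == s) = true from by
      simp only [beq_iff_eq]; exact fun hh => h1 hh.symm), if_neg h1]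
  rcases eq_or_ne s "imu" with h2|h2
  · subst h2; decide
  rw [if_neg (show ¬(("imu" : String) == s) = true from by
      simp only [beq_iff_eq]; exact fun hh => h2 hh.symm), if_neg h2]
  rcases eq_or_ne s "gnss" with h3|h3
  · subst h3; decide
  rw [if_neg (show ¬(("gnss" : String) == s) = true from by
      simp only [beq_iff_eq]; exact fun hh => h3 hh.symm), if_neg h3]
  rcases eq_or_ne s "points" with h4|h4
  · subst h4; decide
  rw [if_neg (show ¬(("points" : String) == s) = true from by
      simp only [beq_iff_eq]; exact fun hh => h4 hh.symm), if_neg h4]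
  rcases eq_or_ne s "point_cloud" with h5|h5
  · subst h5; decide
  rw [if_neg (show ¬(("point_cloud" : String) == s) = true from by
      simp only [beq_iff_eq]; exact fun hh => h5 hh.symm), if_neg h5]
  rcases eq_or_ne s "odom" with h6|h6
  · subst h6; decide
  rw [if_neg (show ¬(("odom" : String) == s) = true from by
      simp only [beq_iff_eq]; exact fun hh => h6 hh.symm), if_neg h6]
  rcases eq_or_ne s "objects3d" with h7|h7
  · subst h7; decide
  rw [if_neg (show ¬(("objects3d" : String) == s) = true from by
      simp only [beq_iff_eq]; exact fun hh => h7 hh.symm), if_neg h7]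
  rcases eq_or_ne s "objects_markers" with h8|h8
  · subst h8; decide
  rw [if_neg (show ¬(("objects_markers" : String) == s) = true from by
      simp only [beq_iff_eq]; exact fun hh => h8 hh.symm), if_neg h8]
  rcases eq_or_ne s "objects_gt_json" with h9|h9
  · subst h9; decide
  rw [if_neg (show ¬(("objects_gt_json" : String) == s) = true from by
      simp only [beq_iff_eq]; exact fun hh => h9 hh.symm), if_neg h9]
  rfl

theorem exactTable_get? (s : String) : itExactTable.get? s =
    if s = "/clock" then some "rosgraph_msgs/msg/Clock"
    else if s = "/tf" then some "tf2_msgs/msg/TFMessage"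
    else none := by
  rw [show itExactTable = PySem.Dict.mk
    [("/clock", "rosgraph_msgs/msg/Clock"), ("/tf", "tf2_msgs/msg/TFMessage")] from rfl]
  simp only [PySem.Dict.get?_mk_cons]
  split_ifs <;>
    simp_all [show ∀ x : String, (PySem.Dict.mk ([] : List (String × String))).get? x = none
      from fun _ => rfl]

-- A's loop body equals B's classify-then-insert step
set_option maxHeartbeats 1600000 in
theorem itStep_eq (d : PySem.Dict String String) (t : String) :
    itStepA d t =
      if t = "" then d
      else match itTopicType t with
        | some v => d.insert t v
        | none => d := by
  by_cases ht : t = ""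
  · simp [itStepA, ht]
  rw [if_neg ht]
  unfold itStepA
  rw [if_neg ht]
  simp only [PySem.Str.endswith_eq]
  simp only [show ("/image" : String).toList = '/' :: ['i','m','a','g','e'] from by decide,
      show ("/camera_info" : String).toList = '/' :: ['c','a','m','e','r','a','_','i','n','f','o'] from by decide,
      show ("/imu" : String).toList = '/' :: ['i','m','u'] from by decide,
      show ("/gnss" : String).toList = '/' :: ['g','n','s','s'] from by decide,
      show ("/points" : String).toList = '/' :: ['p','o','i','n','t','s'] from by decide,
      show ("/point_cloud" : String).toList = '/' :: ['p','o','i','n','t','_','c','l','o','u','d'] from by decide,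
      show ("/odom" : String).toList = '/' :: ['o','d','o','m'] from by decide,
      show ("/objects3d" : String).toList = '/' :: ['o','b','j','e','c','t','s','3','d'] from by decide,
      show ("/objects_markers" : String).toList = '/' :: ['o','b','j','e','c','t','s','_','m','a','r','k','e','r','s'] from by decide,
      show ("/objects_gt_json" : String).toList = '/' :: ['o','b','j','e','c','t','s','_','g','t','_','j','s','o','n'] from by decide]
  by_cases hs : '/' ∈ t.toList
  · -- a slash is present: every suffix test is a test on the last segment
    have hfull : ¬ (t.toList.reverse.takeWhile (fun c => decide (c ≠ '/'))).length = t.toList.length :=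
      fun h => (leafR_full_iff t.toList).mp h hs
    have hr : itRpartitionSlash t.toList =
        (t.toList.take (t.toList.length - (t.toList.reverse.takeWhile (fun c => decide (c ≠ '/'))).length - 1), ['/'],
          (t.toList.reverse.takeWhile (fun c => decide (c ≠ '/'))).reverse) := by
      unfold itRpartitionSlash
      rw [if_neg hfull]
    have hB : itTopicType t =
        match itLeafTable.get? (String.ofList (t.toList.reverse.takeWhile (fun c => decide (c ≠ '/'))).reverse) with
        | some v => some v
        | none => itExactTable.get? t := by
      unfold itTopicType
      rw [hr]
      simp
    simp only [hB,
        endswith_leaf t.toList ['i','m','a','g','e'] (by decide) hs,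
        endswith_leaf t.toList ['c','a','m','e','r','a','_','i','n','f','o'] (by decide) hs,
        endswith_leaf t.toList ['i','m','u'] (by decide) hs,
        endswith_leaf t.toList ['g','n','s','s'] (by decide) hs,
        endswith_leaf t.toList ['p','o','i','n','t','s'] (by decide) hs,
        endswith_leaf t.toList ['p','o','i','n','t','_','c','l','o','u','d'] (by decide) hs,
        endswith_leaf t.toList ['o','d','o','m'] (by decide) hs,
        endswith_leaf t.toList ['o','b','j','e','c','t','s','3','d'] (by decide) hs,
        endswith_leaf t.toList ['o','b','j','e','c','t','s','_','m','a','r','k','e','r','s'] (by decide) hs,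
        endswith_leaf t.toList ['o','b','j','e','c','t','s','_','g','t','_','j','s','o','n'] (by decide) hs,
        leafTable_get?, exactTable_get?]
    simp only [show String.ofList ['i','m','a','g','e'] = "image" from by decide,
        show String.ofList ['c','a','m','e','r','a','_','i','n','f','o'] = "camera_info" from by decide,
        show String.ofList ['i','m','u'] = "imu" from by decide,
        show String.ofList ['g','n','s','s'] = "gnss" from by decide,
        show String.ofList ['p','o','i','n','t','s'] = "points" from by decide,
        show String.ofList ['p','o','i','n','t','_','c','l','o','u','d'] = "point_cloud" from by decide,
        show String.ofList ['o','d','o','m'] = "odom" from by decide,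
        show String.ofList ['o','b','j','e','c','t','s','3','d'] = "objects3d" from by decide,
        show String.ofList ['o','b','j','e','c','t','s','_','m','a','r','k','e','r','s'] = "objects_markers" from by decide,
        show String.ofList ['o','b','j','e','c','t','s','_','g','t','_','j','s','o','n'] = "objects_gt_json" from by decide]
    set sLeaf := String.ofList (t.toList.reverse.takeWhile (fun c => decide (c ≠ '/'))).reverse with hsl
    simp only [beq_iff_eq]
    split_ifs <;> simp_all
  · -- no slash: no suffix rule can fire, and neither exact name matches
    have hB : itTopicType t = itExactTable.get? t := by
      unfold itTopicType itRpartitionSlash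
      rw [if_pos ((leafR_full_iff t.toList).mpr hs)]
      simp
    have hc : t ≠ "/clock" := fun h => hs (by rw [h]; decide)
    have htf : t ≠ "/tf" := fun h => hs (by rw [h]; decide)
    simp only [hB, exactTable_get?,
        endswith_no_slash t.toList ['i','m','a','g','e'] (by decide) hs,
        endswith_no_slash t.toList ['c','a','m','e','r','a','_','i','n','f','o'] (by decide) hs,
        endswith_no_slash t.toList ['i','m','u'] (by decide) hs,
        endswith_no_slash t.toList ['g','n','s','s'] (by decide) hs,
        endswith_no_slash t.toList ['p','o','i','n','t','s'] (by decide) hs,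
        endswith_no_slash t.toList ['p','o','i','n','t','_','c','l','o','u','d'] (by decide) hs,
        endswith_no_slash t.toList ['o','d','o','m'] (by decide) hs,
        endswith_no_slash t.toList ['o','b','j','e','c','t','s','3','d'] (by decide) hs,
        endswith_no_slash t.toList ['o','b','j','e','c','t','s','_','m','a','r','k','e','r','s'] (by decide) hs,
        endswith_no_slash t.toList ['o','b','j','e','c','t','s','_','g','t','_','j','s','o','n'] (by decide) hs]
    simp [hc, htf]

theorem foldl_fusion (topics : List String) (d : PySem.Dict String String) :
    topics.foldl itStepA d =
      ((topics.filter (fun t => t ≠ "")).map (fun t => (t, itTopicType t))).foldl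
        (fun d p => match p.2 with | some mt => d.insert p.1 mt | none => d) d := by
  induction topics generalizing d with
  | nil => rfl
  | cons t ts ih =>
    by_cases ht : t = ""
    · simp [ht, itStep_eq, ih]
    · rw [List.foldl_cons, itStep_eq, if_neg ht, ih]
      simp [ht]

-- ===== VERDICT (by name: the statement is the Claim_ definition above) =====
theorem infer_topic_types_spec : Claim_equal_infer_topic_types := by
  intro topics _
  unfold Spec_infer_topic_types infer_topic_types infer_topic_types_alt
  rw [foldl_fusion]
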